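-- pv_equiv track=rewrite | github.com/STarLighTsMoveMenTs/Likewise | corporation_book_fulltext_generator.py | format_for_a4_pages
-- ===== SOURCE A (Python) =====
-- LINES_PER_PAGE = 48
--
-- CHARS_PER_LINE = 85
--
-- def format_for_a4_pages(content_blocks: list) -> str:
--     """Formatiert Content für A4-Seiten ohne Wiederholungen"""
--     formatted_pages = []
--     current_page = []
--     current_lines = 0
--     page_number = 1
--
--     for block in content_blocks:
--         block_lines = block['content'].split('\n')
--
--         for line in block_lines:
--             # Zeile umbrechen wenn zu lang
--             if len(line) > CHARS_PER_LINE: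
--                 words = line.split()
--                 current_line = ""
--                 for word in words:
--                     if len(current_line + " " + word) <= CHARS_PER_LINE:
--                         current_line += " " + word if current_line else word
--                     else:
--                         if current_line:
--                             current_page.append(current_line)
--                             current_lines += 1
--                         current_line = word
--
--                         # Seitenumbruch wenn nötig
--                         if current_lines >= LINES_PER_PAGE:
--                             current_page.append("")
--                             current_page.append(f"--- Seite {page_number} ---")
--                             formatted_pages.extend(current_page)
--                             formatted_pages.append("\n" + "="*80 + "\n")
--                             current_page = []
--                             current_lines = 0
--                             page_number += 1
--
--                 if current_line:
--                     current_page.append(current_line)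
--                     current_lines += 1
--             else:
--                 current_page.append(line)
--                 current_lines += 1
--
--             # Seitenumbruch wenn nötig
--             if current_lines >= LINES_PER_PAGE:
--                 current_page.append("")
--                 current_page.append(f"--- Seite {page_number} ---")
--                 formatted_pages.extend(current_page)
--                 formatted_pages.append("\n" + "="*80 + "\n")
--                 current_page = []
--                 current_lines = 0
--                 page_number += 1
--
--     # Letzte Seite hinzufügen
--     if current_page:
--         current_page.append("")
--         current_page.append(f"--- Seite {page_number} ---")
--         formatted_pages.extend(current_page)
--
--     return '\n'.join(formatted_pages)
-- ===== SOURCE B (Python) =====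
-- LINES_PER_PAGE = 48
--
-- CHARS_PER_LINE = 85
--
--
-- def _wrap(line):
--     """A's exact wrap rule: short lines pass through; long lines rebuilt word-by-word."""
--     if len(line) <= CHARS_PER_LINE:
--         return [line]
--     out = []
--     current = ""
--     for word in line.split():
--         if len(current + " " + word) <= CHARS_PER_LINE:
--             current = current + " " + word if current else word
--         else:
--             if current:
--                 out.append(current)
--             current = word
--     if current:
--         out.append(current)
--     return out
--
--
-- def _paginate(lines, page):
--     """Chunk a flat line list into pages of 48 lines; only full pages get the separator."""
--     if len(lines) >= LINES_PER_PAGE: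
--         return (lines[:LINES_PER_PAGE]
--                 + ["", f"--- Seite {page} ---", "\n" + "=" * 80 + "\n"]
--                 + _paginate(lines[LINES_PER_PAGE:], page + 1))
--     if lines:
--         return lines + ["", f"--- Seite {page} ---"]
--     return []
--
--
-- def format_for_a4_pages(content_blocks: list) -> str:
--     """Formatiert Content für A4-Seiten ohne Wiederholungen"""
--     flat = [wrapped
--             for block in content_blocks
--             for raw in block['content'].split('\n')
--             for wrapped in _wrap(raw)]
--     return '\n'.join(_paginate(flat, 1))
-- ===== Notes on version B (the rewrite author's own statement) =====
-- stated objective: alternative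
-- what changed: A interleaves wrapping and pagination in one stateful pass (current_page/current_lines/page_number mutated inside three nested loops); B is two phases: first build the flat list of wrapped lines (per-line wrap helper), then recursively chunk that list into 48-line pages, appending the separator only to full pages.
import Mathlib
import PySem

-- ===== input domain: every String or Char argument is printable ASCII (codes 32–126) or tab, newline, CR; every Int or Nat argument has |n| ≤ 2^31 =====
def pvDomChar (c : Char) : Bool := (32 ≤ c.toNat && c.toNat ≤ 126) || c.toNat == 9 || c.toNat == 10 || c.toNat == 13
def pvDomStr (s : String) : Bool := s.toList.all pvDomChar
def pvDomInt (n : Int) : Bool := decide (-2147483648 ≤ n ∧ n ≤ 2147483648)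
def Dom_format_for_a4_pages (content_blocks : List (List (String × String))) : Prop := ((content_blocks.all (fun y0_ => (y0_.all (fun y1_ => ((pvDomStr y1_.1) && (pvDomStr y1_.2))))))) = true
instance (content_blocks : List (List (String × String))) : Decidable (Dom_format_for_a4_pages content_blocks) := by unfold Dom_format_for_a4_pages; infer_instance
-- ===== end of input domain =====

-- B re-decomposes A's one-pass paginator into two phases (flat wrapped-line list, then
-- recursive chunking into 48-line pages); return values proved equal wherever A returns.

-- ===== PORT A =====
-- "\n" + "="*80 + "\n"
def pvSepLine : List Char := '\n' :: (List.replicate 80 '=' ++ ['\n'])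
-- f"--- Seite {n} ---"
def pvSeite (n : Int) : List Char := "--- Seite ".toList ++ PySem.Int.toChars n ++ " ---".toList

structure PvStA where
  fp : List (List Char)   -- formatted_pages
  cp : List (List Char)   -- current_page
  cl : Int                -- current_lines
  pn : Int                -- page_number
deriving Repr

-- the repeated "Seitenumbruch wenn nötig" block of A
def pvBrkA (s : PvStA) : PvStA :=
  if s.cl ≥ 48 then
    ⟨s.fp ++ (s.cp ++ [[], pvSeite s.pn]) ++ [pvSepLine], [], 0, s.pn + 1⟩
  else s

-- body of `for word in words` (state = ((formatted/current page state), current_line))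
def pvWordStepA (s : PvStA × List Char) (word : List Char) : PvStA × List Char :=
  let (st, cur) := s
  if (cur ++ ' ' :: word).length ≤ 85 then
    (st, if cur ≠ [] then cur ++ ' ' :: word else word)
  else
    let st1 := if cur ≠ [] then ⟨st.fp, st.cp ++ [cur], st.cl + 1, st.pn⟩ else st
    (pvBrkA st1, word)

-- body of `for line in block_lines`
def pvLineStepA (st : PvStA) (line : List Char) : PvStA :=
  let st2 :=
    if line.length > 85 then
      let r := (PySem.Chars.split₀ line).foldl pvWordStepA (st, [])
      if r.2 ≠ [] then ⟨r.1.fp, r.1.cp ++ [r.2], r.1.cl + 1, r.1.pn⟩ else r.1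
    else ⟨st.fp, st.cp ++ [line], st.cl + 1, st.pn⟩
  pvBrkA st2

-- body of `for block in content_blocks`; block['content'] is total here via getD "",
-- Pre_ excludes the missing-key inputs on which Python raises KeyError
def pvBlockStepA (st : PvStA) (block : List (String × String)) : PvStA :=
  (PySem.Chars.splitOn (PySem.Dict.getD (PySem.Dict.ofList block) "content" "").toList ['\n']).foldl pvLineStepA st

def format_for_a4_pages (content_blocks : List (List (String × String))) : String :=
  let st := content_blocks.foldl pvBlockStepA ⟨[], [], 0, 1⟩
  let fp := if st.cp ≠ [] then st.fp ++ (st.cp ++ [[], pvSeite st.pn]) else st.fp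
  String.ofList (PySem.Chars.join ['\n'] fp)

-- ===== PORT B =====
-- body of `for word in line.split()` in _wrap (state = (out, current))
def pvWrapStepB (s : List (List Char) × List Char) (word : List Char) : List (List Char) × List Char :=
  let (out, cur) := s
  if (cur ++ ' ' :: word).length ≤ 85 then
    (out, if cur ≠ [] then cur ++ ' ' :: word else word)
  else
    (if cur ≠ [] then out ++ [cur] else out, word)

-- _wrap
def pvWrapB (line : List Char) : List (List Char) :=
  if line.length ≤ 85 then [line]
  else
    let r := (PySem.Chars.split₀ line).foldl pvWrapStepB ([], [])
    if r.2 ≠ [] then r.1 ++ [r.2] else r.1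

-- _paginate (lines[:48] / lines[48:] with the literal nonneg bound 48 are take/drop)
def pvPaginateB (ls : List (List Char)) (page : Int) : List (List Char) :=
  if 48 ≤ ls.length then
    ls.take 48 ++ [[], pvSeite page, pvSepLine] ++ pvPaginateB (ls.drop 48) (page + 1)
  else if ls ≠ [] then ls ++ [[], pvSeite page]
  else []
termination_by ls.length
decreasing_by simp; omega

-- the `flat` comprehension
def pvFlatB (content_blocks : List (List (String × String))) : List (List Char) :=
  content_blocks.flatMap (fun block =>
    (PySem.Chars.splitOn (PySem.Dict.getD (PySem.Dict.ofList block) "content" "").toList ['\n']).flatMap pvWrapB)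

def format_for_a4_pages_alt (content_blocks : List (List (String × String))) : String :=
  String.ofList (PySem.Chars.join ['\n'] (pvPaginateB (pvFlatB content_blocks) 1))

-- ===== PRECONDITION & SPEC =====
-- Pre_ excludes exactly the inputs where Python A raises KeyError: a block without a 'content' key.
def Pre_format_for_a4_pages (content_blocks : List (List (String × String))) : Prop :=
  ∀ block ∈ content_blocks, PySem.Dict.contains (PySem.Dict.ofList block) "content" = true
instance (content_blocks : List (List (String × String))) : Decidable (Pre_format_for_a4_pages content_blocks) := by unfold Pre_format_for_a4_pages; infer_instance

def pvWitness_format_for_a4_pages : (List (List (String × String))) := [[("content", "hello world")]]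

def Spec_format_for_a4_pages (content_blocks : List (List (String × String))) (out : String) : Prop := out = format_for_a4_pages_alt content_blocks
instance (content_blocks : List (List (String × String))) (out : String) : Decidable (Spec_format_for_a4_pages content_blocks out) := by unfold Spec_format_for_a4_pages; infer_instance

-- ===== CLAIM (what is proved, stated in full; the proofs are below) =====
def Claim_equal_format_for_a4_pages : Prop := ∀ (content_blocks : List (List (String × String))), Dom_format_for_a4_pages content_blocks → Pre_format_for_a4_pages content_blocks → Spec_format_for_a4_pages content_blocks (format_for_a4_pages content_blocks)

-- ===== LEMMAS AND PROOFS =====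

-- appending one wrapped line to A's running state = A's append + page-break check
def pvEmitA (st : PvStA) (l : List Char) : PvStA := pvBrkA ⟨st.fp, st.cp ++ [l], st.cl + 1, st.pn⟩

lemma pvBrkA_of_lt {st : PvStA} (h : st.cl < 48) : pvBrkA st = st := by
  simp [pvBrkA]; omega

lemma pvEmitA_cl_lt {st : PvStA} (_h : st.cl < 48) (l : List Char) : (pvEmitA st l).cl < 48 := by
  simp only [pvEmitA, pvBrkA]
  split
  · simp
  · simp
    omega

lemma pvFoldEmitA_cl_lt {st : PvStA} (h : st.cl < 48) (ls : List (List Char)) :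
    (ls.foldl pvEmitA st).cl < 48 := by
  induction ls generalizing st with
  | nil => exact h
  | cons l ls ih => exact ih (pvEmitA_cl_lt h l)

lemma pvWrapStepB_out (ws : List (List Char)) (out : List (List Char)) (cur : List Char) :
    ws.foldl pvWrapStepB (out, cur) =
      (out ++ (ws.foldl pvWrapStepB ([], cur)).1, (ws.foldl pvWrapStepB ([], cur)).2) := by
  induction ws generalizing out cur with
  | nil => simp
  | cons w ws ih =>
    simp only [List.foldl_cons, pvWrapStepB]
    split
    · exact ih out _
    · by_cases hc : cur ≠ []
      · rw [if_pos hc, if_pos hc, ih (out ++ [cur]) w, ih ([] ++ [cur]) w]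
        simp [List.append_assoc]
      · rw [if_neg hc, if_neg hc]
        exact ih out w

-- A's word loop = B's word loop, with the flushed lines replayed through pvEmitA
lemma pvWordFold (ws : List (List Char)) (st : PvStA) (cur : List Char) (h : st.cl < 48) :
    ws.foldl pvWordStepA (st, cur) =
      ((ws.foldl pvWrapStepB ([], cur)).1.foldl pvEmitA st,
       (ws.foldl pvWrapStepB ([], cur)).2) := by
  induction ws generalizing st cur with
  | nil => simp
  | cons w ws ih =>
    simp only [List.foldl_cons, pvWordStepA, pvWrapStepB]
    split
    · exact ih st _ h
    · rw [pvWrapStepB_out ws]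
      by_cases hc : cur ≠ []
      · simp only [if_pos hc]
        have hb : pvBrkA ⟨st.fp, st.cp ++ [cur], st.cl + 1, st.pn⟩ = pvEmitA st cur := rfl
        rw [hb, ih _ w (pvEmitA_cl_lt h cur)]
        simp
      · simp only [if_neg hc]
        simp [pvBrkA_of_lt h, ih st w h]

-- A's per-line processing = replaying B's wrap of that line
lemma pvLineStep_eq (st : PvStA) (line : List Char) (h : st.cl < 48) :
    pvLineStepA st line = (pvWrapB line).foldl pvEmitA st := by
  by_cases hl : line.length > 85
  · simp only [pvLineStepA, pvWrapB, hl, if_true, if_neg (by omega : ¬ line.length ≤ 85)]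
    rw [pvWordFold _ st [] h]
    set r := (PySem.Chars.split₀ line).foldl pvWrapStepB ([], [])
    by_cases hc : r.2 ≠ []
    · rw [if_pos hc, if_pos hc, List.foldl_append]
      rfl
    · rw [if_neg hc, if_neg hc]
      exact pvBrkA_of_lt (pvFoldEmitA_cl_lt h r.1)
  · simp only [pvLineStepA, pvWrapB, hl, if_false, if_pos (by omega : line.length ≤ 85)]
    rfl

lemma pvFoldLine_eq (lines : List (List Char)) (st : PvStA) (h : st.cl < 48) :
    lines.foldl pvLineStepA st = (lines.flatMap pvWrapB).foldl pvEmitA st := by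
  induction lines generalizing st with
  | nil => simp
  | cons l lines ih =>
    simp only [List.foldl_cons, List.flatMap_cons, List.foldl_append]
    rw [pvLineStep_eq st l h]
    exact ih _ (pvFoldEmitA_cl_lt h _)

lemma pvFoldBlock_eq (blocks : List (List (String × String))) (st : PvStA) (h : st.cl < 48) :
    blocks.foldl pvBlockStepA st = (pvFlatB blocks).foldl pvEmitA st := by
  induction blocks generalizing st with
  | nil => simp [pvFlatB]
  | cons b blocks ih =>
    simp only [List.foldl_cons, pvFlatB, List.flatMap_cons, List.foldl_append, pvBlockStepA]
    rw [pvFoldLine_eq _ st h]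
    rw [ih _ (pvFoldEmitA_cl_lt h _)]
    rfl

def pvFinishA (st : PvStA) : List (List Char) :=
  if st.cp ≠ [] then st.fp ++ (st.cp ++ [[], pvSeite st.pn]) else st.fp

-- the key pagination invariant: replaying lines into a partially filled page and finishing
-- equals B's recursive 48-line chunking of (pending page ++ lines)
lemma pvPagInv (ls : List (List Char)) (fp cp : List (List Char)) (pn : Int)
    (h : cp.length < 48) :
    pvFinishA (ls.foldl pvEmitA ⟨fp, cp, (cp.length : Int), pn⟩) =
      fp ++ pvPaginateB (cp ++ ls) pn := by
  induction ls generalizing fp cp pn with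
  | nil =>
    rw [pvPaginateB]
    simp only [List.foldl_nil, List.append_nil, pvFinishA]
    rw [if_neg (by omega : ¬ 48 ≤ cp.length)]
    split <;> simp
  | cons l ls ih =>
    simp only [List.foldl_cons, pvEmitA, pvBrkA]
    by_cases hfull : (cp.length : Int) + 1 ≥ 48
    · rw [if_pos hfull]
      have hlen : (cp ++ [l]).length = 48 := by simp; omega
      have h0 : ((0 : Int)) = (([] : List (List Char)).length : Int) := by simp
      rw [h0, ih _ [] (pn + 1) (by simp)]
      have hsplit : cp ++ l :: ls = (cp ++ [l]) ++ ls := by simp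
      rw [hsplit]
      conv_rhs => rw [pvPaginateB]
      rw [if_pos (by simp; omega), List.take_left' hlen, List.drop_left' hlen]
      simp
    · rw [if_neg hfull]
      have hcast : (cp.length : Int) + 1 = ((cp ++ [l]).length : Int) := by simp
      rw [hcast, ih fp (cp ++ [l]) pn (by simp; omega)]
      simp

-- ===== VERDICT (by name: the statement is the Claim_ definition above) =====
theorem format_for_a4_pages_spec : Claim_equal_format_for_a4_pages := by
  intro cbs _ _
  show format_for_a4_pages cbs = format_for_a4_pages_alt cbs
  have h0 : format_for_a4_pages cbs =
      String.ofList (PySem.Chars.join ['\n'] (pvFinishA (cbs.foldl pvBlockStepA ⟨[], [], 0, 1⟩))) := rfl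
  have h1 := pvPagInv (pvFlatB cbs) [] [] 1 (by simp)
  simp only [List.length_nil, Nat.cast_zero, List.nil_append] at h1
  rw [h0, pvFoldBlock_eq cbs _ (by norm_num), h1]
  rfl
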